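-- pv_equiv track=rewrite | github.com/BrendanLeber/adventofcode | 2016/20-firewall_rules/firewall_rules.py | solve
-- ===== SOURCE A (Python) =====
-- from typing import List, Tuple
--
-- def test_ip(ip: int, rules: List[Tuple[int, int]], max_addr: int) -> bool:
--     for (start, end) in rules:
--         if start <= ip <= end:
--             break
--     else:
--         if ip < max_addr:
--             return True
--     return False
--
-- def solve(rules: List[Tuple[int, int]], max_addr: int) -> Tuple[int, int]:
--     candidates = [rule[1] + 1 for rule in rules]
--     valids = [candidate for candidate in candidates if test_ip(candidate, rules, max_addr)]
--     one: int = valids[0]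
--
--     two: int = 0
--     for ip in valids:
--         while test_ip(ip, rules, max_addr):
--             two += 1
--             ip += 1
--
--     return (one, two)
-- ===== SOURCE B (Python) =====
-- def solve(rules, max_addr):
--     # closed-form gap lengths instead of A's per-address while loop
--     spans = [(s, e) for (s, e) in rules if s <= e]
--     one = None
--     two = 0
--     for (_, e) in rules:
--         c = e + 1
--         if c < max_addr and all(not (s <= c <= e2) for (s, e2) in spans):
--             if one is None:
--                 one = c
--             nxt = min((s for (s, _) in spans if s > c), default=max_addr)
--             two += min(nxt, max_addr) - c
--     return (one, two)
-- ===== Notes on version B (the rewrite author's own statement) =====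
-- stated objective: faster
-- what changed: B replaces A's per-address while-loop (testing every IP in a gap against all rules) by a closed-form gap length: for each allowed candidate end+1 it takes min(next rule start above it, max_addr) - candidate, and it checks coverage against the non-empty intervals only.
import Mathlib
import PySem

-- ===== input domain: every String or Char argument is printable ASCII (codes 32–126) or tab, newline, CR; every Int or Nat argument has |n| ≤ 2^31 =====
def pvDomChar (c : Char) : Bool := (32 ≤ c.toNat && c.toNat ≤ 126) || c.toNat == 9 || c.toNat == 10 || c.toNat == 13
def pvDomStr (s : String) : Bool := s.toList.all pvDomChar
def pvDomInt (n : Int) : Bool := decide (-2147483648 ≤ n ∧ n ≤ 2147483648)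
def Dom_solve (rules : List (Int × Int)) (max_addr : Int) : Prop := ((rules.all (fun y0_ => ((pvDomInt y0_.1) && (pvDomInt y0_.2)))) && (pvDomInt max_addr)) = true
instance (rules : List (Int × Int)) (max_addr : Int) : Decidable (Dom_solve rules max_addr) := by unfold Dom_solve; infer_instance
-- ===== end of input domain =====

-- B replaces A's per-address while-loop counting with closed-form gap lengths (next rule start above the candidate); measured asymptotically faster in the address range.
-- A raises IndexError (valids[0]) when no candidate end+1 is allowed; Pre_solve excludes exactly those inputs.


-- ===== PORT A =====
-- test_ip: the for-break-else scan over rules, then 'ip < max_addr'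
def test_ip (ip : Int) (rules : List (Int × Int)) (max_addr : Int) : Bool :=
  if rules.any (fun r => decide (r.1 ≤ ip) && decide (ip ≤ r.2)) then false
  else decide (ip < max_addr)

-- needed by runCount's termination argument
theorem test_ip_lt (ip : Int) (rules : List (Int × Int)) (max_addr : Int)
    (h : test_ip ip rules max_addr = true) : ip < max_addr := by
  unfold test_ip at h
  split at h
  · simp at h
  · exact of_decide_eq_true h

-- the 'while test_ip(ip, ...): two += 1; ip += 1' loop: two is the accumulator
def runCount (rules : List (Int × Int)) (max_addr : Int) (two ip : Int) : Int :=
  if h : test_ip ip rules max_addr = true then runCount rules max_addr (two + 1) (ip + 1) else two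
termination_by (max_addr - ip).toNat
decreasing_by
  have := test_ip_lt ip rules max_addr h
  omega

def solve (rules : List (Int × Int)) (max_addr : Int) : Int × Int :=
  let candidates := rules.map (fun r => r.2 + 1)
  let valids := candidates.filter (fun c => test_ip c rules max_addr)
  let one := valids.headD 0      -- valids[0]; IndexError on empty valids is excluded by Pre_solve
  let two := valids.foldl (fun acc ip => runCount rules max_addr acc ip) 0
  (one, two)

-- ===== PORT B =====
def pvSpans (rules : List (Int × Int)) : List (Int × Int) :=
  rules.filter (fun r => decide (r.1 ≤ r.2))

def pvCond (spans : List (Int × Int)) (max_addr c : Int) : Bool :=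
  decide (c < max_addr) && spans.all (fun s => !(decide (s.1 ≤ c) && decide (c ≤ s.2)))

-- min((s for (s, _) in spans if s > c), default=max_addr)
def pvNxt (spans : List (Int × Int)) (max_addr c : Int) : Int :=
  PySem.List.minD ((spans.filter (fun s => decide (c < s.1))).map Prod.fst) id max_addr

def pvStep (spans : List (Int × Int)) (max_addr : Int)
    (acc : Option Int × Int) (r : Int × Int) : Option Int × Int :=
  let c := r.2 + 1
  if pvCond spans max_addr c then
    ((match acc.1 with | none => some c | some o => some o),
     acc.2 + (min (pvNxt spans max_addr c) max_addr - c))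
  else acc

def solve_alt (rules : List (Int × Int)) (max_addr : Int) : Int × Int :=
  let spans := pvSpans rules
  let res := rules.foldl (pvStep spans max_addr) (none, 0)
  (res.1.getD 0, res.2)

-- ===== PRECONDITION & SPEC =====
-- Pre_solve: some candidate end+1 is allowed (below max_addr and covered by no rule);
-- otherwise A's 'valids[0]' raises IndexError, so exactly those inputs are excluded.
def Pre_solve (rules : List (Int × Int)) (max_addr : Int) : Prop :=
  ∃ r ∈ rules, r.2 + 1 < max_addr ∧ ∀ r' ∈ rules, ¬ (r'.1 ≤ r.2 + 1 ∧ r.2 + 1 ≤ r'.2)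
instance (rules : List (Int × Int)) (max_addr : Int) : Decidable (Pre_solve rules max_addr) := by
  unfold Pre_solve; infer_instance

def pvWitness_solve : (List (Int × Int)) × Int := ([((-3 : Int), (0 : Int))], (5 : Int))

def Spec_solve (rules : List (Int × Int)) (max_addr : Int) (out : Int × Int) : Prop := out = solve_alt rules max_addr
instance (rules : List (Int × Int)) (max_addr : Int) (out : Int × Int) : Decidable (Spec_solve rules max_addr out) := by unfold Spec_solve; infer_instance

-- ===== CLAIM (what is proved, stated in full; the proofs are below) =====
def Claim_equal_solve : Prop := ∀ (rules : List (Int × Int)) (max_addr : Int), Dom_solve rules max_addr → Pre_solve rules max_addr → Spec_solve rules max_addr (solve rules max_addr)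

-- ===== LEMMAS AND PROOFS =====

-- the list of allowed candidates, in order (A's 'valids' restricted to a prefix L of rules)
def pvValids (rules : List (Int × Int)) (max_addr : Int) (L : List (Int × Int)) : List Int :=
  (L.map (fun r => r.2 + 1)).filter (fun c => test_ip c rules max_addr)

-- A's test_ip and B's condition, characterised and equated
theorem test_iff (rules : List (Int × Int)) (max_addr c : Int) :
    test_ip c rules max_addr = true ↔
      (c < max_addr ∧ ∀ r ∈ rules, ¬ (r.1 ≤ c ∧ c ≤ r.2)) := by
  unfold test_ip
  split
  next h =>
    simp only [List.any_eq_true, Bool.and_eq_true, decide_eq_true_eq] at h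
    obtain ⟨r, hr, h1, h2⟩ := h
    constructor
    · intro hft; simp at hft
    · rintro ⟨-, hall⟩; exact absurd ⟨h1, h2⟩ (hall r hr)
  next h =>
    simp only [List.any_eq_true, not_exists, Bool.and_eq_true, decide_eq_true_eq] at h
    simp only [decide_eq_true_eq]
    constructor
    · intro hlt
      exact ⟨hlt, fun r hr hcov => h r ⟨hr, hcov⟩⟩
    · exact fun h' => h'.1

theorem cond_iff (rules : List (Int × Int)) (max_addr c : Int) :
    pvCond (pvSpans rules) max_addr c = true ↔
      (c < max_addr ∧ ∀ r ∈ rules, ¬ (r.1 ≤ c ∧ c ≤ r.2)) := by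
  unfold pvCond pvSpans
  simp only [Bool.and_eq_true, decide_eq_true_eq, List.all_eq_true, List.mem_filter,
    Bool.not_eq_true', Bool.and_eq_false_iff, decide_eq_false_iff_not]
  constructor
  · rintro ⟨h1, h2⟩
    refine ⟨h1, fun r hr hcov => ?_⟩
    have hle : r.1 ≤ r.2 := by omega
    have := h2 r ⟨hr, by simpa using hle⟩
    omega
  · rintro ⟨h1, h2⟩
    refine ⟨h1, fun s hs => ?_⟩
    have := h2 s hs.1
    omega

theorem cond_eq_test (rules : List (Int × Int)) (max_addr c : Int) :
    pvCond (pvSpans rules) max_addr c = test_ip c rules max_addr := by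
  rw [Bool.eq_iff_iff, cond_iff, test_iff]

theorem cond_spec (spans : List (Int × Int)) (max_addr c : Int)
    (h : pvCond spans max_addr c = true) :
    c < max_addr ∧ ∀ s ∈ spans, ¬ (s.1 ≤ c ∧ c ≤ s.2) := by
  unfold pvCond at h
  simp only [Bool.and_eq_true, decide_eq_true_eq, List.all_eq_true, Bool.not_eq_true',
    Bool.and_eq_false_iff, decide_eq_false_iff_not] at h
  exact ⟨h.1, fun s hs => by have := h.2 s hs; omega⟩

theorem cond_of (spans : List (Int × Int)) (max_addr c : Int)
    (h1 : c < max_addr) (h2 : ∀ s ∈ spans, ¬ (s.1 ≤ c ∧ c ≤ s.2)) :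
    pvCond spans max_addr c = true := by
  unfold pvCond
  simp only [Bool.and_eq_true, decide_eq_true_eq, List.all_eq_true, Bool.not_eq_true',
    Bool.and_eq_false_iff, decide_eq_false_iff_not]
  exact ⟨h1, fun s hs => by have := h2 s hs; omega⟩

-- min? of a nonempty fold is never none
theorem foldl_some_of (f : Option Int → Int → Option Int)
    (hf : ∀ (m x : Int), ∃ v, f (some m) x = some v) :
    ∀ (l : List Int) (a0 : Int), l.foldl f (some a0) ≠ none := by
  intro l
  induction l with
  | nil => intro a0; simp
  | cons a t ih =>
    intro a0
    simp only [List.foldl_cons]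
    obtain ⟨v, hv⟩ := hf a0 a
    rw [hv]
    exact ih v

theorem min?_cons_ne_none (a : Int) (l : List Int) :
    PySem.List.min? (a :: l) id ≠ none := by
  unfold PySem.List.min?
  simp only [List.foldl_cons]
  exact foldl_some_of _
    (fun m x => by
      show ∃ v, (if id x < id m then some x else some m) = some v
      split
      · exact ⟨x, rfl⟩
      · exact ⟨m, rfl⟩) l a

theorem nxt_gt (spans : List (Int × Int)) (max_addr c : Int) (hc : c < max_addr) :
    c < pvNxt spans max_addr c := by
  unfold pvNxt PySem.List.minD
  cases hm : PySem.List.min? ((spans.filter (fun s => decide (c < s.1))).map Prod.fst) id with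
  | none => simpa using hc
  | some v =>
    have hv := PySem.List.min?_mem hm
    obtain ⟨s, hs, hsv⟩ := List.mem_map.mp hv
    have := (List.mem_filter.mp hs).2
    simp only [decide_eq_true_eq] at this
    simp only [Option.getD_some]
    omega

theorem nxt_le (spans : List (Int × Int)) (max_addr c : Int) (s : Int × Int)
    (hs : s ∈ spans) (h : c < s.1) : pvNxt spans max_addr c ≤ s.1 := by
  unfold pvNxt PySem.List.minD
  have hmem : s.1 ∈ (spans.filter (fun s => decide (c < s.1))).map Prod.fst :=
    List.mem_map.mpr ⟨s, List.mem_filter.mpr ⟨hs, by simpa using h⟩, rfl⟩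
  cases hm : PySem.List.min? ((spans.filter (fun s => decide (c < s.1))).map Prod.fst) id with
  | none =>
    exfalso
    cases hl : (spans.filter (fun s => decide (c < s.1))).map Prod.fst with
    | nil => rw [hl] at hmem; simp at hmem
    | cons a t => rw [hl] at hm; exact min?_cons_ne_none a t hm
  | some v =>
    have := PySem.List.min?_isMin hm s.1 hmem
    simpa using this

theorem nxt_mem_or (spans : List (Int × Int)) (max_addr c : Int) :
    pvNxt spans max_addr c = max_addr ∨
      ∃ s ∈ spans, s.1 = pvNxt spans max_addr c ∧ c < s.1 := by
  unfold pvNxt PySem.List.minD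
  cases hm : PySem.List.min? ((spans.filter (fun s => decide (c < s.1))).map Prod.fst) id with
  | none => left; rfl
  | some v =>
    right
    have hv := PySem.List.min?_mem hm
    obtain ⟨s, hs, hsv⟩ := List.mem_map.mp hv
    have h2 := (List.mem_filter.mp hs).2
    simp only [decide_eq_true_eq] at h2
    exact ⟨s, (List.mem_filter.mp hs).1, by simp [hsv], h2⟩

-- the closed-form gap length equals the while-loop count
theorem runCount_eq_gap_aux (rules : List (Int × Int)) (max_addr : Int) :
    ∀ (n : Nat) (c : Int), (max_addr - c).toNat ≤ n →
      pvCond (pvSpans rules) max_addr c = true →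
      ∀ (t : Int), runCount rules max_addr t c = t + (min (pvNxt (pvSpans rules) max_addr c) max_addr - c) := by
  intro n
  induction n with
  | zero =>
    intro c hn hc
    have := (cond_spec _ _ _ hc).1
    omega
  | succ n ih =>
    intro c hn hc t
    obtain ⟨hlt, hncov⟩ := cond_spec _ _ _ hc
    have hspan : ∀ s ∈ pvSpans rules, s.1 ≤ s.2 := by
      intro s hs
      have := (List.mem_filter.mp hs).2
      simpa using this
    have htest : test_ip c rules max_addr = true := by rw [← cond_eq_test]; exact hc
    have hN : c < min (pvNxt (pvSpans rules) max_addr c) max_addr :=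
      lt_min (nxt_gt _ _ _ hlt) hlt
    rw [runCount, dif_pos htest]
    by_cases hstep : c + 1 < min (pvNxt (pvSpans rules) max_addr c) max_addr
    · -- c+1 still allowed; gap shrinks by one and pvNxt is unchanged
      have hne : ∀ s ∈ pvSpans rules, ¬ (s.1 ≤ c + 1 ∧ c + 1 ≤ s.2) := by
        intro s hs hcov
        by_cases h1 : c < s.1
        · have := nxt_le (pvSpans rules) max_addr c s hs h1
          omega
        · exact hncov s hs ⟨by omega, by omega⟩
      have hc1 : pvCond (pvSpans rules) max_addr (c + 1) = true :=
        cond_of _ _ _ (by omega) hne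
      have hfilter : (pvSpans rules).filter (fun s => decide (c + 1 < s.1))
          = (pvSpans rules).filter (fun s => decide (c < s.1)) := by
        apply List.filter_congr
        intro s hs
        have h1 : s.1 ≠ c + 1 := by
          intro heq
          exact hne s hs ⟨by omega, by have := hspan s hs; omega⟩
        simp only [decide_eq_decide]
        omega
      have hnxt : pvNxt (pvSpans rules) max_addr (c + 1) = pvNxt (pvSpans rules) max_addr c := by
        unfold pvNxt
        rw [hfilter]
      have := ih (c + 1) (by omega) hc1 (t + 1)
      rw [this, hnxt]
      omega
    · -- the gap ends right after c: either max_addr = c+1 or a span starts at c+1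
      have hend : min (pvNxt (pvSpans rules) max_addr c) max_addr = c + 1 := by omega
      have htest1 : test_ip (c + 1) rules max_addr = false := by
        rw [← cond_eq_test]
        rcases nxt_mem_or (pvSpans rules) max_addr c with hmax | ⟨s, hs, hsv, hsc⟩
        · -- pvNxt = max_addr, so max_addr = c+1: c+1 not < max_addr
          unfold pvCond
          have : ¬ (c + 1 < max_addr) := by omega
          simp [this]
        · by_cases h1 : max_addr ≤ c + 1
          · unfold pvCond
            have : ¬ (c + 1 < max_addr) := by omega
            simp [this]
          · -- then pvNxt = c+1 = s.1, and s covers c+1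
            have h1' : c + 1 < max_addr := by omega
            have hv : s.1 = c + 1 := by
              have := min_le_left (pvNxt (pvSpans rules) max_addr c) max_addr
              omega
            unfold pvCond
            rw [Bool.and_eq_false_iff]
            right
            rw [List.all_eq_false]
            refine ⟨s, hs, ?_⟩
            have hss := hspan s hs
            simp
            omega
      rw [runCount, dif_neg (by simp [htest1])]
      omega

theorem runCount_eq_gap (rules : List (Int × Int)) (max_addr c t : Int)
    (hc : pvCond (pvSpans rules) max_addr c = true) :
    runCount rules max_addr t c = t + (min (pvNxt (pvSpans rules) max_addr c) max_addr - c) :=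
  runCount_eq_gap_aux rules max_addr (max_addr - c).toNat c le_rfl hc t

-- B's fold, characterised against A's valids list
theorem foldB (rules : List (Int × Int)) (max_addr : Int) :
    ∀ (L : List (Int × Int)) (o : Option Int) (t : Int),
      L.foldl (pvStep (pvSpans rules) max_addr) (o, t)
        = ((match o with
            | none => (pvValids rules max_addr L).head?
            | some x => some x),
           t + ((pvValids rules max_addr L).map
                  (fun c => min (pvNxt (pvSpans rules) max_addr c) max_addr - c)).sum) := by
  intro L
  induction L with
  | nil =>
    intro o t
    cases o <;> simp [pvValids]
  | cons r L ih =>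
    intro o t
    simp only [List.foldl_cons]
    by_cases hc : pvCond (pvSpans rules) max_addr (r.2 + 1) = true
    · have htest : test_ip (r.2 + 1) rules max_addr = true := by rw [← cond_eq_test]; exact hc
      have hval : pvValids rules max_addr (r :: L) = (r.2 + 1) :: pvValids rules max_addr L := by
        unfold pvValids
        simp [htest]
      rw [show pvStep (pvSpans rules) max_addr (o, t) r
            = ((match o with | none => some (r.2 + 1) | some x => some x),
               t + (min (pvNxt (pvSpans rules) max_addr (r.2 + 1)) max_addr - (r.2 + 1))) by
            unfold pvStep; simp [hc]]
      rw [ih]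
      cases o <;> simp [hval] <;> ring
    · have htest : test_ip (r.2 + 1) rules max_addr = false := by
        rw [← cond_eq_test]; simpa using hc
      have hval : pvValids rules max_addr (r :: L) = pvValids rules max_addr L := by
        unfold pvValids
        simp [htest]
      rw [show pvStep (pvSpans rules) max_addr (o, t) r = (o, t) by
            unfold pvStep; simp [hc]]
      rw [ih, hval]

-- ===== VERDICT (by name: the statement is the Claim_ definition above) =====
theorem solve_spec : Claim_equal_solve := by
  intro rules max_addr _ _
  unfold Spec_solve
  simp only [solve, solve_alt]
  rw [foldB rules max_addr rules none 0]
  have hsum : (pvValids rules max_addr rules).foldl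
      (fun acc ip => runCount rules max_addr acc ip) 0
      = ((pvValids rules max_addr rules).map
          (fun c => min (pvNxt (pvSpans rules) max_addr c) max_addr - c)).sum := by
    have hcongr := PySem.List.foldl_congr_mem (pvValids rules max_addr rules)
      (fun acc ip => runCount rules max_addr acc ip)
      (fun acc ip => acc + (min (pvNxt (pvSpans rules) max_addr ip) max_addr - ip)) 0
      (by
        intro acc c hcm
        unfold pvValids at hcm
        have htest := (List.mem_filter.mp hcm).2
        exact runCount_eq_gap rules max_addr c acc (by rw [cond_eq_test]; exact htest))
    rw [hcongr, PySem.List.foldl_add, zero_add]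
  simp only [pvValids] at hsum ⊢
  rw [hsum, List.headD_eq_head?_getD]
  simp
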